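-- pv_equiv track=rewrite | github.com/OmniNode-ai/omnibase_core | src/omnibase_core/validation/validator_hardcoded_topics.py | _line_is_suppressed
-- ===== SOURCE A (Python) =====
-- _LINE_SUPPRESSION_MARKERS: frozenset[str] = frozenset(
--     {
--         "onex-topic-sot",
--         "onex-topic-test-fixture",
--         "onex-topic-doc-example",
--         "onex-topic-allow:",
--     }
-- )
--
-- def _line_is_suppressed(line: str) -> bool:
--     stripped = line.lstrip()
--     if stripped.startswith(("#", "//")):
--         for marker in _LINE_SUPPRESSION_MARKERS:
--             if marker in stripped:
--                 return True
--     for marker in _LINE_SUPPRESSION_MARKERS: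
--         if marker in line:
--             return True
--     return False
-- ===== SOURCE B (Python) =====
-- _PREFIX = "onex-topic-"
-- _SUFFIXES = ("sot", "test-fixture", "doc-example", "allow:")
--
--
-- def _line_is_suppressed(line: str) -> bool:
--     # Single left-to-right scan: at each position look for the shared
--     # "onex-topic-" prefix, then check which suppression suffix follows.
--     for i in range(len(line)):
--         if line.startswith(_PREFIX, i) and line.startswith(_SUFFIXES, i + len(_PREFIX)):
--             return True
--     return False
-- ===== Notes on version B (the rewrite author's own statement) =====
-- stated objective: alternative
-- what changed: A lstrips the line, branches on a comment prefix and runs four independent per-marker substring scans; B drops the redundant comment branch entirely and does a single left-to-right scan over positions, testing for the shared 11-char marker prefix and then which suppression suffix follows.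
import Mathlib
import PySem

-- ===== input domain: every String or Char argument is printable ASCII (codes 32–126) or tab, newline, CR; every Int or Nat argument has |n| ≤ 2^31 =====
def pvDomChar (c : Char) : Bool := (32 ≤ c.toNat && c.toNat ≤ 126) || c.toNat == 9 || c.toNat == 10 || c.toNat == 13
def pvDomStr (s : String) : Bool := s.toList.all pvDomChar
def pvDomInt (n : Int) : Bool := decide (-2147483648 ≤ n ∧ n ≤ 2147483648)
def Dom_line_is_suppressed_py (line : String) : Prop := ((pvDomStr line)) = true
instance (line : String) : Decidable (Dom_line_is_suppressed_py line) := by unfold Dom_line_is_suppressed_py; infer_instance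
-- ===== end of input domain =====

-- B replaces A's redundant lstrip/startswith branch and four independent substring scans
-- by one left-to-right scan that looks for the shared "onex-topic-" prefix and then the
-- distinguishing suffix (objective: alternative single-pass algorithm).

-- ===== PORT A =====
def pvMarkers : List String :=
  ["onex-topic-sot", "onex-topic-test-fixture", "onex-topic-doc-example", "onex-topic-allow:"]

def line_is_suppressed_py (line : String) : Bool :=
  let stripped := PySem.Str.lstrip line
  if PySem.Str.startswith stripped "#" || PySem.Str.startswith stripped "//" then
    if pvMarkers.any (fun m => PySem.Str.isIn m stripped) then true
    else pvMarkers.any (fun m => PySem.Str.isIn m line)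
  else pvMarkers.any (fun m => PySem.Str.isIn m line)

-- ===== PORT B =====
def pvPrefix : List Char := "onex-topic-".toList

def pvSuffixes : List (List Char) :=
  ["sot".toList, "test-fixture".toList, "doc-example".toList, "allow:".toList]

-- one iteration of Source B's index loop, looking at line[i:]
def pvHit (t : List Char) : Bool :=
  pvPrefix.isPrefixOf t && pvSuffixes.any (fun s => s.isPrefixOf (t.drop pvPrefix.length))

-- Source B's 'for i in range(len(line))' as recursion over the successive suffixes line[i:]
def pvScan : List Char → Bool
  | [] => false
  | c :: rest => if pvHit (c :: rest) then true else pvScan rest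

def line_is_suppressed_py_alt (line : String) : Bool := pvScan line.toList

-- ===== PRECONDITION & SPEC =====
def Spec_line_is_suppressed_py (line : String) (out : Bool) : Prop := out = line_is_suppressed_py_alt line
instance (line : String) (out : Bool) : Decidable (Spec_line_is_suppressed_py line out) := by unfold Spec_line_is_suppressed_py; infer_instance

-- ===== CLAIM (what is proved, stated in full; the proofs are below) =====
def Claim_equal_line_is_suppressed_py : Prop := ∀ (line : String), Dom_line_is_suppressed_py line → Spec_line_is_suppressed_py line (line_is_suppressed_py line)

-- ===== LEMMAS AND PROOFS =====

-- (a ++ b) is a prefix of t iff a is, and b is a prefix of what is left after a.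
theorem pv_prefix_append_iff (a b t : List Char) :
    (a ++ b) <+: t ↔ a <+: t ∧ b <+: t.drop a.length := by
  constructor
  · rintro ⟨r, hr⟩
    subst hr
    refine ⟨⟨b ++ r, by simp⟩, ?_⟩
    rw [List.append_assoc, List.drop_left]
    exact ⟨r, rfl⟩
  · rintro ⟨⟨r, hr⟩, hb⟩
    subst hr
    rw [List.drop_left] at hb
    obtain ⟨r', hr'⟩ := hb
    exact ⟨r', by rw [List.append_assoc, hr']⟩

-- B's per-position test fires exactly when some full marker is a prefix of the rest.
theorem pv_hit_iff (t : List Char) :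
    pvHit t = true ↔ ∃ m ∈ pvMarkers, m.toList <+: t := by
  have e1 : "onex-topic-sot".toList = pvPrefix ++ "sot".toList := by decide
  have e2 : "onex-topic-test-fixture".toList = pvPrefix ++ "test-fixture".toList := by decide
  have e3 : "onex-topic-doc-example".toList = pvPrefix ++ "doc-example".toList := by decide
  have e4 : "onex-topic-allow:".toList = pvPrefix ++ "allow:".toList := by decide
  simp only [pvHit, Bool.and_eq_true, List.any_eq_true, List.isPrefixOf_iff_prefix]
  constructor
  · rintro ⟨hp, s, hs, hsuf⟩
    simp only [pvSuffixes, List.mem_cons, List.not_mem_nil, or_false] at hs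
    rcases hs with h | h | h | h <;> subst h
    · exact ⟨"onex-topic-sot", by simp [pvMarkers],
        e1 ▸ (pv_prefix_append_iff pvPrefix _ t).mpr ⟨hp, hsuf⟩⟩
    · exact ⟨"onex-topic-test-fixture", by simp [pvMarkers],
        e2 ▸ (pv_prefix_append_iff pvPrefix _ t).mpr ⟨hp, hsuf⟩⟩
    · exact ⟨"onex-topic-doc-example", by simp [pvMarkers],
        e3 ▸ (pv_prefix_append_iff pvPrefix _ t).mpr ⟨hp, hsuf⟩⟩
    · exact ⟨"onex-topic-allow:", by simp [pvMarkers],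
        e4 ▸ (pv_prefix_append_iff pvPrefix _ t).mpr ⟨hp, hsuf⟩⟩
  · rintro ⟨m, hm, hpre⟩
    simp only [pvMarkers, List.mem_cons, List.not_mem_nil, or_false] at hm
    rcases hm with h | h | h | h <;> subst h
    · rw [e1] at hpre
      obtain ⟨hp, hsuf⟩ := (pv_prefix_append_iff pvPrefix _ t).mp hpre
      exact ⟨hp, "sot".toList, by simp [pvSuffixes], hsuf⟩
    · rw [e2] at hpre
      obtain ⟨hp, hsuf⟩ := (pv_prefix_append_iff pvPrefix _ t).mp hpre
      exact ⟨hp, "test-fixture".toList, by simp [pvSuffixes], hsuf⟩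
    · rw [e3] at hpre
      obtain ⟨hp, hsuf⟩ := (pv_prefix_append_iff pvPrefix _ t).mp hpre
      exact ⟨hp, "doc-example".toList, by simp [pvSuffixes], hsuf⟩
    · rw [e4] at hpre
      obtain ⟨hp, hsuf⟩ := (pv_prefix_append_iff pvPrefix _ t).mp hpre
      exact ⟨hp, "allow:".toList, by simp [pvSuffixes], hsuf⟩

-- B's scan finds exactly the lines with a marker occurring at some position.
theorem pv_scan_iff (l : List Char) :
    pvScan l = true ↔ ∃ m ∈ pvMarkers, ∃ j, m.toList <+: l.drop j := by
  induction l with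
  | nil =>
    simp only [pvScan]
    constructor
    · intro h; cases h
    · rintro ⟨m, hm, j, hp⟩
      simp only [List.drop_nil, List.prefix_nil] at hp
      fin_cases hm <;> simp_all
  | cons c rest ih =>
    simp only [pvScan]
    split_ifs with h
    · simp only [true_iff]
      obtain ⟨m, hm, hp⟩ := (pv_hit_iff _).mp h
      exact ⟨m, hm, 0, by simpa using hp⟩
    · rw [ih]
      constructor
      · rintro ⟨m, hm, j, hp⟩
        exact ⟨m, hm, j + 1, by simpa using hp⟩
      · rintro ⟨m, hm, j, hp⟩
        cases j with
        | zero =>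
          exact absurd ((pv_hit_iff _).mpr ⟨m, hm, by simpa using hp⟩) (by simp [h])
        | succ j => exact ⟨m, hm, j, by simpa using hp⟩

-- a marker inside the lstripped line is inside the line
theorem pv_in_stripped (m line : String)
    (h : PySem.Str.isIn m (PySem.Str.lstrip line) = true) :
    PySem.Str.isIn m line = true := by
  rw [PySem.Str.isIn_iff_infix] at h ⊢
  have hsuf : (PySem.Str.lstrip line).toList <:+ line.toList := by
    rw [PySem.Str.toList_lstrip]
    exact List.dropWhile_suffix _
  exact h.trans hsuf.isInfix

-- A is just "some marker occurs in line"
theorem pv_A_eq_any (line : String) :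
    line_is_suppressed_py line = pvMarkers.any (fun m => PySem.Str.isIn m line) := by
  unfold line_is_suppressed_py
  by_cases h1 : (PySem.Str.startswith (PySem.Str.lstrip line) "#"
      || PySem.Str.startswith (PySem.Str.lstrip line) "//") = true
  · simp only [h1, if_true]
    by_cases h2 : (pvMarkers.any fun m => PySem.Str.isIn m (PySem.Str.lstrip line)) = true
    · simp only [h2, if_true]
      obtain ⟨m, hm, hmi⟩ := List.any_eq_true.mp h2
      exact (List.any_eq_true.mpr ⟨m, hm, pv_in_stripped m line hmi⟩).symm
    · rw [if_neg h2]
  · rw [if_neg h1]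

-- ===== VERDICT (by name: the statement is the Claim_ definition above) =====
theorem line_is_suppressed_py_spec : Claim_equal_line_is_suppressed_py := by
  intro line _
  show line_is_suppressed_py line = line_is_suppressed_py_alt line
  rw [pv_A_eq_any, line_is_suppressed_py_alt]
  cases hs : pvScan line.toList with
  | true =>
    obtain ⟨m, hm, j, hp⟩ := (pv_scan_iff _).mp hs
    refine List.any_eq_true.mpr ⟨m, hm, ?_⟩
    rw [PySem.Str.isIn_iff_infix]
    exact (PySem.Chars.exists_prefix_drop_iff_isIn m.toList line.toList).mp ⟨j, hp⟩
      |> fun h => (PySem.Chars.isIn_iff_infix _ _).mp h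
  | false =>
    rw [Bool.eq_false_iff]
    intro hc
    obtain ⟨m, hm, hmi⟩ := List.any_eq_true.mp hc
    rw [PySem.Str.isIn_iff_infix] at hmi
    obtain ⟨j, hp⟩ := (PySem.Chars.exists_prefix_drop_iff_isIn m.toList line.toList).mpr
      ((PySem.Chars.isIn_iff_infix _ _).mpr hmi)
    exact absurd ((pv_scan_iff _).mpr ⟨m, hm, j, hp⟩) (by simp [hs])
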